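-- pv_equiv track=rewrite | github.com/benquick123/code-profiling | code/batch-2/vse-naloge-brez-testov/DN7-M-098.py | po_sosedih
-- ===== SOURCE A (Python) =====
-- def sosedov(x, y, mine):
--     """
--     Vrni število sosedov polja s koordinatami `(x, y)` na katerih je mina.
--     Polje samo ne šteje.
--
--     Args:
--         x (int): koordinata x
--         y (int): koordinata y
--         mine (set of tuple of int): koordinate min
--
--     Returns:
--         int: število sosedov
--     """
--     isky = y - 1
--     stmin = 0
--     while isky <= y + 1:
--         iskx = x - 1
--         while iskx <= x + 1:
--             if (iskx, isky) in mine: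
--                 stmin += 1
--             iskx += 1
--         isky += 1
--     if (x, y) in mine:
--         stmin -= 1
--     return stmin
--
-- def po_sosedih(mine, s, v):
--     """
--     Vrni slovar, katerega ključi so možna števila sosednjih polj z minami
--     (torej števila od 0 do 8), vrednosti pa množice koordinat polj s toliko
--     sosedami.
--
--     Args:
--         mine (set of tuple of int): koordinate min
--         s (int): širina polja
--         v (int): višina polja
--
--     Returns:
--         dict: (glej zgoraj)
--     """
--     dictpoljamine = {0: set(), 1: set(), 2: set(), 3: set(), 4: set(), 5: set(), 6: set(), 7: set(), 8: set()}
--     stmin = 0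
--     while stmin <= 8:
--         y = 0
--         while y <= v - 1:
--             x = 0
--             while x <= s - 1:
--                 if sosedov(x, y, mine) == stmin:
--                     dictpoljamine[stmin].add((x, y))
--                 x += 1
--             y += 1
--         stmin += 1
--     return dictpoljamine
-- ===== SOURCE B (Python) =====
-- # Single pass over the grid: compute each cell's neighbor count once and put the
-- # cell straight into the matching bucket (A rescans the whole grid once per count).
-- OFFSETS = [(-1, -1), (0, -1), (1, -1), (-1, 0), (1, 0), (-1, 1), (0, 1), (1, 1)]
--
-- def po_sosedih(mine, s, v):
--     d = {n: set() for n in range(9)}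
--     for y in range(v):
--         for x in range(s):
--             n = 0
--             for dx, dy in OFFSETS:
--                 if (x + dx, y + dy) in mine:
--                     n += 1
--             d[n].add((x, y))
--     return d
-- ===== Notes on version B (the rewrite author's own statement) =====
-- stated objective: faster
-- what changed: B scans the grid once, computes each cell's neighbor count from the 8 offsets directly and drops the cell into its bucket, instead of A's nine full-grid passes (one per possible count) each recomputing the 3x3 neighborhood.
import Mathlib
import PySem

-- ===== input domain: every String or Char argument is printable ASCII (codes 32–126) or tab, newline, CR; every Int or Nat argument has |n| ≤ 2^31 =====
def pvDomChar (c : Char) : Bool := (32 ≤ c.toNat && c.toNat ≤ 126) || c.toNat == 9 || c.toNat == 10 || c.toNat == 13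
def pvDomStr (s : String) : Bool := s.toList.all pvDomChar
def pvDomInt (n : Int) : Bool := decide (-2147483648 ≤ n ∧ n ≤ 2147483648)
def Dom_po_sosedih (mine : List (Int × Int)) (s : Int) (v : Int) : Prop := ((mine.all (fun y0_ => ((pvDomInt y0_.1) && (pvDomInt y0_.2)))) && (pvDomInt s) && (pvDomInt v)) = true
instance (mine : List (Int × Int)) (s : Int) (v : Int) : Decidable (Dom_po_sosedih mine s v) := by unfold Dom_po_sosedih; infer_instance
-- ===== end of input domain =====

-- B makes a single pass over the grid, computing each cell's neighbor count once and putting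
-- the cell straight into its bucket, instead of A's nine full-grid passes (one per count).
-- Python B builds its sets in the same (y, x) scan order, so the return values coincide exactly.

-- ===== PORT A =====
def sosedov (x : Int) (y : Int) (mine : List (Int × Int)) : Int :=
  let stmin : Int :=
    (PySem.List.pyRange (y - 1) (y + 1 + 1) 1).foldl (fun st isky =>
      (PySem.List.pyRange (x - 1) (x + 1 + 1) 1).foldl (fun st iskx =>
        if (iskx, isky) ∈ mine then st + 1 else st) st) 0
  if (x, y) ∈ mine then stmin - 1 else stmin

def po_sosedih (mine : List (Int × Int)) (s : Int) (v : Int) : List (Int × List (Int × Int)) :=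
  let dictpoljamine : PySem.Dict Int (List (Int × Int)) :=
    PySem.Dict.ofList [(0, []), (1, []), (2, []), (3, []), (4, []), (5, []), (6, []), (7, []), (8, [])]
  ((PySem.List.pyRange 0 (8 + 1) 1).foldl (fun d stmin =>
    (PySem.List.pyRange 0 v 1).foldl (fun d y =>
      (PySem.List.pyRange 0 s 1).foldl (fun d x =>
        if sosedov x y mine = stmin then d.modify stmin [] (fun st => PySem.Set.add st (x, y))
        else d) d) d) dictpoljamine).items

-- ===== PORT B =====
def pvOffsets : List (Int × Int) := [(-1, -1), (0, -1), (1, -1), (-1, 0), (1, 0), (-1, 1), (0, 1), (1, 1)]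

def pvStevec (x : Int) (y : Int) (mine : List (Int × Int)) : Int :=
  pvOffsets.foldl (fun n d => if (x + d.1, y + d.2) ∈ mine then n + 1 else n) 0

def po_sosedih_alt (mine : List (Int × Int)) (s : Int) (v : Int) : List (Int × List (Int × Int)) :=
  let d0 : PySem.Dict Int (List (Int × Int)) :=
    (PySem.List.pyRange 0 9 1).foldl (fun d n => d.insert n []) PySem.Dict.empty
  ((PySem.List.pyRange 0 v 1).foldl (fun d y =>
    (PySem.List.pyRange 0 s 1).foldl (fun d x =>
      d.modify (pvStevec x y mine) [] (fun st => PySem.Set.add st (x, y))) d) d0).items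

-- ===== PRECONDITION & SPEC =====
def Spec_po_sosedih (mine : List (Int × Int)) (s : Int) (v : Int) (out : List (Int × List (Int × Int))) : Prop := out = po_sosedih_alt mine s v
instance (mine : List (Int × Int)) (s : Int) (v : Int) (out : List (Int × List (Int × Int))) : Decidable (Spec_po_sosedih mine s v out) := by unfold Spec_po_sosedih; infer_instance

-- ===== CLAIM (what is proved, stated in full; the proofs are below) =====
def Claim_equal_po_sosedih : Prop := ∀ (mine : List (Int × Int)) (s : Int) (v : Int), Dom_po_sosedih mine s v → Spec_po_sosedih mine s v (po_sosedih mine s v)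

-- ===== LEMMAS AND PROOFS =====

lemma pyRange_three (a : Int) : PySem.List.pyRange a (a + 1 + 1 + 1) 1 = [a, a + 1, a + 1 + 1] := by
  rw [PySem.List.pyRange_one_cons (by omega), PySem.List.pyRange_one_cons (by omega),
      PySem.List.pyRange_one_cons (by omega), PySem.List.pyRange_one_eq_nil (by omega)]

lemma foldl_if_prop {α : Type} (P : α → Prop) [DecidablePred P] (L : List α) (st : Int) :
    L.foldl (fun n a => if P a then n + 1 else n) st
      = st + (L.countP (fun a => decide (P a)) : Int) := by
  simpa using PySem.List.foldl_count_if (fun a => decide (P a)) L st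

lemma pvStevec_countP (x y : Int) (mine : List (Int × Int)) :
    pvStevec x y mine
      = 0 + (List.countP (fun q => decide (q ∈ mine))
          [(x-1,y-1),(x,y-1),(x+1,y-1),(x-1,y),(x+1,y),(x-1,y+1),(x,y+1),(x+1,y+1)] : Int) := by
  unfold pvStevec pvOffsets
  rw [foldl_if_prop (fun d : Int × Int => (x + d.1, y + d.2) ∈ mine)]
  simp only [List.countP_cons, List.countP_nil]
  rw [show x + (-1 : Int) = x - 1 by ring, show y + (-1 : Int) = y - 1 by ring,
      show x + (0 : Int) = x by ring, show y + (0 : Int) = y by ring]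

lemma sosedov_eq (x y : Int) (mine : List (Int × Int)) : sosedov x y mine = pvStevec x y mine := by
  have hB := pvStevec_countP x y mine
  have hrow : ∀ b st : Int,
      List.foldl (fun st iskx => if (iskx, b) ∈ mine then st + 1 else st) st [x - 1, x - 1 + 1, x - 1 + 1 + 1]
        = st + (List.countP (fun q => decide (q ∈ mine)) [(x-1,b),(x,b),(x+1,b)] : Int) := by
    intro b st
    rw [foldl_if_prop (fun iskx : Int => (iskx, b) ∈ mine)]
    simp only [List.countP_cons, List.countP_nil]
    rw [show x - 1 + 1 + 1 = x + 1 by ring, show x - 1 + 1 = x by ring]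
  have hperm : ((([(x-1,y-1),(x,y-1),(x+1,y-1),(x-1,y)] : List (Int × Int))) ++ (x,y) ::
        ([(x+1,y),(x-1,y+1),(x,y+1),(x+1,y+1)] : List (Int × Int))).Perm
      ([(x-1,y-1),(x,y-1),(x+1,y-1),(x-1,y),(x+1,y),(x-1,y+1),(x,y+1),(x+1,y+1)] ++ [(x,y)]) := by
    refine List.perm_middle.trans ?_
    exact (List.perm_append_singleton _ _).symm
  have hsplit : (List.countP (fun q => decide (q ∈ mine)) [(x-1,y-1),(x,y-1),(x+1,y-1)])
        + (List.countP (fun q => decide (q ∈ mine)) [(x-1,y),(x,y),(x+1,y)])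
        + (List.countP (fun q => decide (q ∈ mine)) [(x-1,y+1),(x,y+1),(x+1,y+1)])
      = (List.countP (fun q => decide (q ∈ mine))
          [(x-1,y-1),(x,y-1),(x+1,y-1),(x-1,y),(x+1,y),(x-1,y+1),(x,y+1),(x+1,y+1)])
        + (if (x, y) ∈ mine then 1 else 0) := by
    have h9 := hperm.countP_eq (p := fun q => decide (q ∈ mine))
    rw [List.countP_append] at h9
    rw [← List.countP_append, ← List.countP_append]
    rw [show (([(x-1,y-1),(x,y-1),(x+1,y-1)] : List (Int × Int)) ++ [(x-1,y),(x,y),(x+1,y)]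
          ++ [(x-1,y+1),(x,y+1),(x+1,y+1)])
        = (([(x-1,y-1),(x,y-1),(x+1,y-1),(x-1,y)] : List (Int × Int))) ++ (x,y) ::
          ([(x+1,y),(x-1,y+1),(x,y+1),(x+1,y+1)] : List (Int × Int)) from rfl]
    rw [List.countP_append, h9, List.countP_append]
    by_cases hc : (x, y) ∈ mine <;> simp [hc]
  unfold sosedov
  rw [show y + 1 + 1 = (y - 1) + 1 + 1 + 1 by ring, show x + 1 + 1 = (x - 1) + 1 + 1 + 1 by ring,
      pyRange_three, pyRange_three]
  simp only [hrow]
  simp only [List.foldl_cons, List.foldl_nil, show y - 1 + 1 = y by ring]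
  rw [hB]
  by_cases hc : (x, y) ∈ mine <;> simp [hc] at hsplit ⊢ <;> omega

lemma pvStevec_bounds (x y : Int) (mine : List (Int × Int)) :
    0 ≤ pvStevec x y mine ∧ pvStevec x y mine ≤ 8 := by
  rw [pvStevec_countP]
  have := List.countP_le_length (p := fun q => decide (q ∈ mine))
    (l := [(x-1,y-1),(x,y-1),(x+1,y-1),(x-1,y),(x+1,y),(x-1,y+1),(x,y+1),(x+1,y+1)])
  simp at this ⊢
  omega

-- the grid cells in the traversal order both programs share
def pvGrid (s v : Int) : List (Int × Int) :=
  (PySem.List.pyRange 0 v 1).flatMap (fun y => (PySem.List.pyRange 0 s 1).map (fun x => (x, y)))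

-- bucket contents accumulated over a cell list
def pvFill (mine : List (Int × Int)) (c : Int) (L : List (Int × Int)) (acc : List (Int × Int)) :
    List (Int × Int) :=
  (L.filter (fun p => decide (pvStevec p.1 p.2 mine = c))).foldl (fun a p => PySem.Set.add a p) acc

-- B's fold: value at any key
lemma getD_foldB (mine : List (Int × Int)) (L : List (Int × Int))
    (d : PySem.Dict Int (List (Int × Int))) (c : Int) :
    (L.foldl (fun d p => d.modify (pvStevec p.1 p.2 mine) [] (fun st => PySem.Set.add st p)) d).getD c []
      = pvFill mine c L (d.getD c []) := by
  induction L generalizing d with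
  | nil => simp [pvFill]
  | cons p L ih =>
    simp only [List.foldl_cons, ih, pvFill, List.filter_cons]
    by_cases h : pvStevec p.1 p.2 mine = c
    · simp [h]
    · simp [h, PySem.Dict.getD_modify, Ne.symm h]

-- A's per-count fold: value at any key (stated with A's own predicate)
def pvFillA (mine : List (Int × Int)) (c : Int) (L : List (Int × Int)) (acc : List (Int × Int)) :
    List (Int × Int) :=
  (L.filter (fun p => decide (sosedov p.1 p.2 mine = c))).foldl (fun a p => PySem.Set.add a p) acc

lemma pvFillA_eq (mine : List (Int × Int)) (c : Int) (L : List (Int × Int)) (acc : List (Int × Int)) :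
    pvFillA mine c L acc = pvFill mine c L acc := by
  unfold pvFillA pvFill
  rw [List.filter_congr (fun p _ => by rw [sosedov_eq])]

lemma getD_foldA (mine : List (Int × Int)) (c : Int) (L : List (Int × Int))
    (d : PySem.Dict Int (List (Int × Int))) (c' : Int) :
    (L.foldl (fun d p => if sosedov p.1 p.2 mine = c then d.modify c [] (fun st => PySem.Set.add st p) else d) d).getD c' []
      = if c' = c then pvFillA mine c L (d.getD c []) else d.getD c' [] := by
  induction L generalizing d with
  | nil => by_cases h : c' = c <;> simp [pvFillA, h]
  | cons p L ih =>
    simp only [List.foldl_cons]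
    by_cases h : sosedov p.1 p.2 mine = c
    · simp only [if_pos h, ih, PySem.Dict.getD_modify]
      by_cases h' : c' = c <;> simp [h', pvFillA, h]
    · simp only [if_neg h, ih]
      by_cases h' : c' = c <;> simp [h', pvFillA, h]

-- keys are preserved by both folds
lemma keys_foldB (mine : List (Int × Int)) (L : List (Int × Int))
    (d : PySem.Dict Int (List (Int × Int)))
    (h : ∀ p ∈ L, pvStevec p.1 p.2 mine ∈ d.keys) :
    (L.foldl (fun d p => d.modify (pvStevec p.1 p.2 mine) [] (fun st => PySem.Set.add st p)) d).keys = d.keys := by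
  induction L generalizing d with
  | nil => rfl
  | cons p L ih =>
    have hk : (d.modify (pvStevec p.1 p.2 mine) [] (fun st => PySem.Set.add st p)).keys = d.keys := by
      rw [PySem.Dict.keys_modify, PySem.Dict.keys_insert_of_contains]
      rw [PySem.Dict.contains_iff_mem_keys]
      exact h p (by simp)
    simp only [List.foldl_cons]
    rw [ih _ (by intro q hq; rw [hk]; exact h q (by simp [hq])), hk]

lemma keys_foldA (mine : List (Int × Int)) (c : Int) (L : List (Int × Int))
    (d : PySem.Dict Int (List (Int × Int))) (h : c ∈ d.keys) :
    (L.foldl (fun d p => if sosedov p.1 p.2 mine = c then d.modify c [] (fun st => PySem.Set.add st p) else d) d).keys = d.keys := by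
  induction L generalizing d with
  | nil => rfl
  | cons p L ih =>
    have hk : ∀ d' : PySem.Dict Int (List (Int × Int)), c ∈ d'.keys →
        ((if sosedov p.1 p.2 mine = c then d'.modify c [] (fun st => PySem.Set.add st p) else d') : PySem.Dict Int (List (Int × Int))).keys = d'.keys := by
      intro d' hc'
      split_ifs with hs
      · rw [PySem.Dict.keys_modify, PySem.Dict.keys_insert_of_contains]
        rw [PySem.Dict.contains_iff_mem_keys]; exact hc'
      · rfl
    simp only [List.foldl_cons]
    rw [ih _ (by rw [hk d h]; exact h), hk d h]

lemma keys_outerA (mine : List (Int × Int)) (G : List (Int × Int)) (cs : List Int)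
    (d : PySem.Dict Int (List (Int × Int))) (h : ∀ c ∈ cs, c ∈ d.keys) :
    (cs.foldl (fun d c =>
        G.foldl (fun d p => if sosedov p.1 p.2 mine = c then d.modify c [] (fun st => PySem.Set.add st p) else d) d) d).keys = d.keys := by
  induction cs generalizing d with
  | nil => rfl
  | cons c0 rest ih =>
    simp only [List.foldl_cons]
    have hk := keys_foldA mine c0 G d (h c0 (by simp))
    rw [ih _ (by intro q hq; rw [hk]; exact h q (by simp [hq])), hk]

-- A's outer fold over a duplicate-free list of counts
lemma getD_outerA (mine : List (Int × Int)) (G : List (Int × Int)) (cs : List Int)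
    (d : PySem.Dict Int (List (Int × Int))) (c : Int) (hnd : cs.Nodup) :
    (cs.foldl (fun d c =>
        G.foldl (fun d p => if sosedov p.1 p.2 mine = c then d.modify c [] (fun st => PySem.Set.add st p) else d) d) d).getD c []
      = if c ∈ cs then pvFillA mine c G (d.getD c []) else d.getD c [] := by
  induction cs generalizing d with
  | nil => simp
  | cons c0 rest ih =>
    simp only [List.foldl_cons]
    rcases List.nodup_cons.mp hnd with ⟨hc0, hrest⟩
    rw [ih _ hrest]
    by_cases hmem : c ∈ rest
    · have hne : c ≠ c0 := fun h => hc0 (h ▸ hmem)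
      simp [hmem, getD_foldA, hne, List.mem_cons]
    · by_cases heq : c = c0
      · simp [heq, getD_foldA, hc0]
      · simp [hmem, heq, getD_foldA, List.mem_cons]

-- the two double loops are folds over pvGrid
lemma foldB_grid (mine : List (Int × Int)) (s v : Int) (d : PySem.Dict Int (List (Int × Int))) :
    (PySem.List.pyRange 0 v 1).foldl (fun d y =>
      (PySem.List.pyRange 0 s 1).foldl (fun d x =>
        d.modify (pvStevec x y mine) [] (fun st => PySem.Set.add st (x, y))) d) d
    = (pvGrid s v).foldl (fun d p => d.modify (pvStevec p.1 p.2 mine) [] (fun st => PySem.Set.add st p)) d := by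
  rw [pvGrid, List.foldl_flatMap]
  congr 1
  funext d y
  rw [List.foldl_map]

lemma foldA_grid (mine : List (Int × Int)) (c : Int) (s v : Int)
    (d : PySem.Dict Int (List (Int × Int))) :
    (PySem.List.pyRange 0 v 1).foldl (fun d y =>
      (PySem.List.pyRange 0 s 1).foldl (fun d x =>
        if sosedov x y mine = c then d.modify c [] (fun st => PySem.Set.add st (x, y)) else d) d) d
    = (pvGrid s v).foldl (fun d p => if sosedov p.1 p.2 mine = c then d.modify c [] (fun st => PySem.Set.add st p) else d) d := by
  rw [pvGrid, List.foldl_flatMap]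
  congr 1
  funext d y
  rw [List.foldl_map]

-- ===== VERDICT (by name: the statement is the Claim_ definition above) =====
theorem po_sosedih_spec : Claim_equal_po_sosedih := by
  intro mine s v _
  unfold Spec_po_sosedih po_sosedih po_sosedih_alt
  have hd0B : (PySem.List.pyRange 0 9 1).foldl
      (fun (d : PySem.Dict Int (List (Int × Int))) n => d.insert n []) PySem.Dict.empty
      = PySem.Dict.ofList [(0, []), (1, []), (2, []), (3, []), (4, []), (5, []), (6, []), (7, []), (8, [])] := by
    decide
  rw [hd0B]
  set d0 : PySem.Dict Int (List (Int × Int)) :=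
    PySem.Dict.ofList [(0, []), (1, []), (2, []), (3, []), (4, []), (5, []), (6, []), (7, []), (8, [])] with hd0
  have hkeys0 : d0.keys = [0, 1, 2, 3, 4, 5, 6, 7, 8] := by rw [hd0]; decide
  have hget0 : ∀ c : Int, d0.getD c [] = [] := by
    intro c
    by_cases h : c ∈ d0.keys
    · rw [hkeys0] at h
      simp only [List.mem_cons, List.not_mem_nil, or_false] at h
      rcases h with h | h | h | h | h | h | h | h | h <;> subst h <;> decide
    · have hcon : d0.contains c = false := by
        rw [PySem.Dict.contains_eq_decide_mem_keys]; simpa using h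
      exact PySem.Dict.getD_of_not_contains _ _ hcon
  -- A side
  simp only [foldA_grid]
  have h09 : PySem.List.pyRange 0 (8 + 1) 1 = [0, 1, 2, 3, 4, 5, 6, 7, 8] := by decide
  rw [h09]
  set FA := ([0, 1, 2, 3, 4, 5, 6, 7, 8] : List Int).foldl (fun d c =>
      (pvGrid s v).foldl (fun d p => if sosedov p.1 p.2 mine = c then d.modify c [] (fun st => PySem.Set.add st p) else d) d) d0 with hFA
  -- B side
  rw [foldB_grid]
  set FB := (pvGrid s v).foldl (fun d p => d.modify (pvStevec p.1 p.2 mine) [] (fun st => PySem.Set.add st p)) d0 with hFB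
  have hkeysA : FA.keys = [0, 1, 2, 3, 4, 5, 6, 7, 8] := by
    rw [hFA, keys_outerA mine (pvGrid s v) _ d0 (by intro c hc; rw [hkeys0]; exact hc), hkeys0]
  have hkeysB : FB.keys = [0, 1, 2, 3, 4, 5, 6, 7, 8] := by
    rw [hFB, keys_foldB, hkeys0]
    intro p _
    rw [hkeys0]
    have := pvStevec_bounds p.1 p.2 mine
    simp only [List.mem_cons]
    omega
  have hgetA : ∀ c : Int, FA.getD c [] = if c ∈ ([0,1,2,3,4,5,6,7,8] : List Int) then pvFill mine c (pvGrid s v) [] else [] := by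
    intro c
    rw [hFA, getD_outerA mine (pvGrid s v) _ d0 c (by decide), hget0, pvFillA_eq]
  have hgetB : ∀ c : Int, FB.getD c [] = pvFill mine c (pvGrid s v) [] := by
    intro c
    rw [hFB, getD_foldB, hget0]
  rw [PySem.Dict.items_eq_map_keys FA (by rw [hkeysA]; decide) [],
      PySem.Dict.items_eq_map_keys FB (by rw [hkeysB]; decide) [],
      hkeysA, hkeysB]
  apply List.map_congr_left
  intro c hc
  rw [hgetA, hgetB, if_pos hc]
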